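-- pv_equiv track=rewrite | github.com/manwar/perlweeklychallenge-club | challenge-346/lubos-kolouch/python/ch-2.py | magic_expression
-- ===== SOURCE A (Python) =====
-- def magic_expression(digits: str, target: int) -> list[str]:
--     """Return sorted expressions that evaluate to ``target``.
--
--     The function performs a depth-first search over every partition of the
--     digit string, appending each operator while maintaining the cumulative
--     value and most recent operand. Multiplication adjusts the running total
--     to honour standard operator precedence without relying on ``eval``.
--     """
--     if not digits.isdigit():
--         msg = "Input must consist solely of decimal digits."
--         raise ValueError(msg)
--
--     results: list[str] = []
--     length = len(digits)
--
--     def backtrack(index: int, expression: str, value: int,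
--                   last_operand: int) -> None:
--         if index == length:
--             if value == target:
--                 results.append(expression)
--             return
--
--         for end in range(index + 1, length + 1):
--             chunk = digits[index:end]
--             if len(chunk) > 1 and chunk[0] == "0":
--                 break
--             number = int(chunk)
--
--             if index == 0:
--                 backtrack(end, chunk, number, number)
--                 continue
--
--             backtrack(end, f"{expression}+{chunk}", value + number, number)
--             backtrack(end, f"{expression}-{chunk}", value - number, -number)
--             product = last_operand * number
--             backtrack(
--                 end,
--                 f"{expression}*{chunk}",
--                 value - last_operand + product,
--                 product,
--             )
--
--     backtrack(0, "", 0, 0)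
--     results.sort()
--     return results
-- ===== SOURCE B (Python) =====
-- def magic_expression(digits: str, target: int) -> list[str]:
--     """Generate-then-filter: enumerate all token lists (chunks joined by
--     operators), evaluate each with a separate precedence-correct two-pass
--     evaluator, keep those hitting target, render and sort."""
--     if not digits.isdigit():
--         msg = "Input must consist solely of decimal digits."
--         raise ValueError(msg)
--
--     n = len(digits)
--
--     def tails(i):
--         # token-list continuations for digits[i:], each beginning with an operator
--         if i == n:
--             return [[]]
--         out = []
--         for end in range(i + 1, n + 1):
--             chunk = digits[i:end]
--             if len(chunk) > 1 and chunk[0] == "0":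
--                 break
--             subs = tails(end)
--             for op in ("+", "-", "*"):
--                 for rest in subs:
--                     out.append([op, chunk] + rest)
--         return out
--
--     def evaluate(tokens):
--         # two passes folded into one scan: keep the running sum of finished
--         # terms, the pending term and its sign
--         total, sign, term = 0, 1, int(tokens[0])
--         rest = tokens[1:]
--         while rest:
--             op, num, rest = rest[0], int(rest[1]), rest[2:]
--             if op == "*":
--                 term *= num
--             else:
--                 total += sign * term
--                 sign = 1 if op == "+" else -1
--                 term = num
--         return total + sign * term
--
--     out = []
--     for end in range(1, n + 1):
--         chunk = digits[:end]
--         if len(chunk) > 1 and chunk[0] == "0":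
--             break
--         for rest in tails(end):
--             tokens = [chunk] + rest
--             if evaluate(tokens) == target:
--                 out.append("".join(tokens))
--     out.sort()
--     return out
-- ===== Notes on version B (the rewrite author's own statement) =====
-- stated objective: alternative
-- what changed: A evaluates while searching, in one DFS that threads the running value and last operand through every recursive call; B separates generation from evaluation: it recursively enumerates all operator/chunk token lists for each suffix, then evaluates each candidate with a standalone precedence-correct sum-of-signed-terms evaluator, filters by target, renders with join and sorts.
import Mathlib
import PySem

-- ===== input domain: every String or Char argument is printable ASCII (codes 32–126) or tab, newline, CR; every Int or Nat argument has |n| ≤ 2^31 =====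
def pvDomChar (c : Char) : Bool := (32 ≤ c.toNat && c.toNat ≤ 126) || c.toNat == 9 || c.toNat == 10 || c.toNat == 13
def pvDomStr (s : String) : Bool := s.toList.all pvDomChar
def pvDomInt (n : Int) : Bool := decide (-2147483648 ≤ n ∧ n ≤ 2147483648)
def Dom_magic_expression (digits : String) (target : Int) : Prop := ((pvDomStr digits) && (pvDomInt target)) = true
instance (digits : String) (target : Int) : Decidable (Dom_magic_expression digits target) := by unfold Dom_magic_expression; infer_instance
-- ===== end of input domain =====

-- B replaces A's evaluate-during-DFS (running value + last_operand threaded through the search)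
-- by generate-then-filter: enumerate token lists, evaluate each with a separate two-pass
-- precedence evaluator, filter, render, sort.  Objective: alternative decomposition (same cost).


-- ===== PORT A =====
-- backtrack(index, expression, value, last_operand): DFS over partitions; results returned
-- in append order.  'fuel' only makes the recursion total (n - index + 1 always suffices).
mutual
def pvBackA (cs : List Char) (target : Int) (fuel index : Nat)
    (expr : List Char) (value last : Int) : List String :=
  if fuel = 0 then [] else
  if index = cs.length then
    (if value = target then [String.ofList expr] else [])
  else pvLoopA cs target (fuel - 1) index (index + 1) expr value last
termination_by (fuel, 0)
decreasing_by all_goals (simp_wf; omega)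

-- the 'for end in range(index+1, length+1)' loop; 'break' returns []
def pvLoopA (cs : List Char) (target : Int) (fuel index e : Nat)
    (expr : List Char) (value last : Int) : List String :=
  if e ≤ cs.length then
    let chunk := PySem.List.slice cs (some (index : Int)) (some (e : Int))
    if 1 < chunk.length ∧ chunk[0]? = some '0' then []
    else
      let number := (PySem.Int.ofChars? chunk).getD 0
      if index = 0 then
        pvBackA cs target fuel e chunk number number
          ++ pvLoopA cs target fuel index (e + 1) expr value last
      else
        pvBackA cs target fuel e (expr ++ '+' :: chunk) (value + number) number
          ++ pvBackA cs target fuel e (expr ++ '-' :: chunk) (value - number) (-number)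
          ++ pvBackA cs target fuel e (expr ++ '*' :: chunk)
               (value - last + last * number) (last * number)
          ++ pvLoopA cs target fuel index (e + 1) expr value last
  else []
termination_by (fuel, cs.length + 1 - e)
decreasing_by all_goals (simp_wf; omega)
end

def magic_expression (digits : String) (target : Int) : List String :=
  -- not digits.isdigit() → ValueError (excluded by Pre_)
  if PySem.Str.strIsdigit digits = true then
    let cs := digits.toList
    PySem.List.sorted (pvBackA cs target (cs.length + 1) 0 [] 0 0) (fun s => s) false
  else []

-- ===== PORT B =====
-- evaluate's while loop: running sum of finished terms + pending signed term
def pvEvalLoopB (total sign term : Int) : List (List Char) → Int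
  | op :: num :: rest =>
    let numv := (PySem.Int.ofChars? num).getD 0
    if op = ['*'] then pvEvalLoopB total sign (term * numv) rest
    else pvEvalLoopB (total + sign * term) (if op = ['+'] then 1 else -1) numv rest
  | _ => total + sign * term   -- [op] alone is unreachable (tokens alternate num/op)

def pvEvalB (tokens : List (List Char)) : Int :=
  match tokens with
  | c :: rest => pvEvalLoopB 0 1 ((PySem.Int.ofChars? c).getD 0) rest
  | [] => 0                    -- unreachable: tokens always start with a chunk

-- tails(i): token-list continuations for digits[i:], each beginning with an operator
mutual
def pvTailsB (cs : List Char) (fuel i : Nat) : List (List (List Char)) :=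
  if fuel = 0 then [] else
  if i = cs.length then [[]]
  else pvTailsLoopB cs (fuel - 1) i (i + 1)
termination_by (fuel, 0)
decreasing_by all_goals (simp_wf; omega)

def pvTailsLoopB (cs : List Char) (fuel i e : Nat) : List (List (List Char)) :=
  if e ≤ cs.length then
    let chunk := PySem.List.slice cs (some (i : Int)) (some (e : Int))
    if 1 < chunk.length ∧ chunk[0]? = some '0' then []
    else
      let subs := pvTailsB cs fuel e
      (subs.map (fun rest => ['+'] :: chunk :: rest))
        ++ (subs.map (fun rest => ['-'] :: chunk :: rest))
        ++ (subs.map (fun rest => ['*'] :: chunk :: rest))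
        ++ pvTailsLoopB cs fuel i (e + 1)
  else []
termination_by (fuel, cs.length + 1 - e)
decreasing_by all_goals (simp_wf; omega)
end

-- the top-level 'for end in range(1, n+1)' loop over the first chunk
def pvHeadB (cs : List Char) (target : Int) (fuel e : Nat) : List String :=
  if e ≤ cs.length then
    let chunk := PySem.List.slice cs none (some (e : Int))
    if 1 < chunk.length ∧ chunk[0]? = some '0' then []
    else
      ((pvTailsB cs fuel e).filterMap (fun rest =>
          let tokens := chunk :: rest
          if pvEvalB tokens = target then some (String.ofList (PySem.Chars.join [] tokens))
          else none))
        ++ pvHeadB cs target fuel (e + 1)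
  else []
termination_by cs.length + 1 - e
decreasing_by simp_wf; omega

def magic_expression_alt (digits : String) (target : Int) : List String :=
  if PySem.Str.strIsdigit digits = true then
    let cs := digits.toList
    PySem.List.sorted (pvHeadB cs target cs.length 1) (fun s => s) false
  else []

-- ===== PRECONDITION & SPEC =====
-- Pre_ excludes exactly the inputs where A raises ValueError: digits not a nonempty
-- all-digit string ("".isdigit() is False).  B raises the same error there.
def Pre_magic_expression (digits : String) (target : Int) : Prop :=
  PySem.Str.strIsdigit digits = true
instance (digits : String) (target : Int) : Decidable (Pre_magic_expression digits target) := by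
  unfold Pre_magic_expression; infer_instance

def pvWitness_magic_expression : String × Int := ("123", 6)

def Spec_magic_expression (digits : String) (target : Int) (out : List String) : Prop :=
  out = magic_expression_alt digits target
instance (digits : String) (target : Int) (out : List String) :
    Decidable (Spec_magic_expression digits target out) := by
  unfold Spec_magic_expression; infer_instance

-- ===== CLAIM (what is proved, stated in full; the proofs are below) =====
def Claim_equal_magic_expression : Prop :=
  ∀ (digits : String) (target : Int), Dom_magic_expression digits target →
    Pre_magic_expression digits target →
    Spec_magic_expression digits target (magic_expression digits target)

-- ===== LEMMAS AND PROOFS =====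

-- A's accumulator (value, last_operand) pushed over a continuation token list
def pvEvalCont (v l : Int) : List (List Char) → Int
  | op :: c :: ts =>
    let m := (PySem.Int.ofChars? c).getD 0
    if op = ['*'] then pvEvalCont (v - l + l * m) (l * m) ts
    else if op = ['+'] then pvEvalCont (v + m) m ts
    else pvEvalCont (v - m) (-m) ts
  | _ => v

-- what A contributes for one continuation, as a filterMap step
def pvF (target : Int) (expr : List Char) (v l : Int) (ts : List (List Char)) : Option String :=
  if pvEvalCont v l ts = target then some (String.ofList (expr ++ PySem.Chars.join [] ts)) else none

lemma pv_join_nil_cons (p : List Char) (ts : List (List Char)) :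
    PySem.Chars.join [] (p :: ts) = p ++ PySem.Chars.join [] ts := by
  cases ts with
  | nil => simp [PySem.Chars.join_singleton, PySem.Chars.join_nil]
  | cons q r => simpa using PySem.Chars.join_cons_cons [] p q r

-- B's evaluator equals A's accumulator: invariant v = total + sign*term, l = sign*term
lemma pv_evalLoopB_eq (ts : List (List Char)) :
    ∀ total sign term : Int,
      pvEvalLoopB total sign term ts = pvEvalCont (total + sign * term) (sign * term) ts := by
  intro total sign term
  induction total, sign, term, ts using pvEvalLoopB.induct with
  | case1 total sign term num rest numv ih =>
    rw [pvEvalLoopB, pvEvalCont]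
    rw [ih]
    simp only [reduceIte, show numv = (PySem.Int.ofChars? num).getD 0 from rfl]
    congr 1 <;> ring
  | case2 total sign term op num rest numv h ih =>
    rw [pvEvalLoopB, pvEvalCont]
    simp only [if_neg h]
    rw [ih]
    by_cases h2 : op = ['+'] <;>
      simp only [h2, reduceIte, one_mul, neg_one_mul, ← sub_eq_add_neg] <;> rfl
  | case3 t total sign term h =>
    cases t with
    | nil => rfl
    | cons a u =>
      cases u with
      | nil => rfl
      | cons b r => exact absurd rfl (h a b r)

lemma pvF_plus (target : Int) (expr chunk : List Char) (v l : Int) (rest : List (List Char)) :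
    pvF target expr v l (['+'] :: chunk :: rest)
      = pvF target (expr ++ '+' :: chunk) (v + (PySem.Int.ofChars? chunk).getD 0)
          ((PySem.Int.ofChars? chunk).getD 0) rest := by
  unfold pvF
  rw [show pvEvalCont v l (['+'] :: chunk :: rest)
        = pvEvalCont (v + (PySem.Int.ofChars? chunk).getD 0)
            ((PySem.Int.ofChars? chunk).getD 0) rest from by simp [pvEvalCont]]
  rw [pv_join_nil_cons, pv_join_nil_cons]
  simp

lemma pvF_minus (target : Int) (expr chunk : List Char) (v l : Int) (rest : List (List Char)) :
    pvF target expr v l (['-'] :: chunk :: rest)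
      = pvF target (expr ++ '-' :: chunk) (v - (PySem.Int.ofChars? chunk).getD 0)
          (-(PySem.Int.ofChars? chunk).getD 0) rest := by
  unfold pvF
  rw [show pvEvalCont v l (['-'] :: chunk :: rest)
        = pvEvalCont (v - (PySem.Int.ofChars? chunk).getD 0)
            (-(PySem.Int.ofChars? chunk).getD 0) rest from by simp [pvEvalCont]]
  rw [pv_join_nil_cons, pv_join_nil_cons]
  simp

lemma pvF_times (target : Int) (expr chunk : List Char) (v l : Int) (rest : List (List Char)) :
    pvF target expr v l (['*'] :: chunk :: rest)
      = pvF target (expr ++ '*' :: chunk)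
          (v - l + l * (PySem.Int.ofChars? chunk).getD 0)
          (l * (PySem.Int.ofChars? chunk).getD 0) rest := by
  unfold pvF
  rw [show pvEvalCont v l (['*'] :: chunk :: rest)
        = pvEvalCont (v - l + l * (PySem.Int.ofChars? chunk).getD 0)
            (l * (PySem.Int.ofChars? chunk).getD 0) rest from by simp [pvEvalCont]]
  rw [pv_join_nil_cons, pv_join_nil_cons]
  simp

lemma pv_loop_eq (cs : List Char) (target : Int) (fuel : Nat)
    (H : ∀ index expr v l, 0 < index → cs.length < index + fuel →
      pvBackA cs target fuel index expr v l
        = (pvTailsB cs fuel index).filterMap (pvF target expr v l)) :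
    ∀ n e index expr v l, cs.length + 1 - e ≤ n → 0 < e → 0 < index →
      cs.length < e + fuel →
      pvLoopA cs target fuel index e expr v l
        = (pvTailsLoopB cs fuel index e).filterMap (pvF target expr v l) := by
  intro n
  induction n with
  | zero =>
    intro e index expr v l hle he hi hf
    rw [pvLoopA, pvTailsLoopB]
    have hgt : ¬ e ≤ cs.length := by omega
    simp [hgt]
  | succ n ihn =>
    intro e index expr v l hle he hi hf
    rw [pvLoopA, pvTailsLoopB]
    by_cases hel : e ≤ cs.length
    · simp only [hel, if_true]
      by_cases hz : 1 < (PySem.List.slice cs (some (index : Int)) (some (e : Int))).length ∧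
          (PySem.List.slice cs (some (index : Int)) (some (e : Int)))[0]? = some '0'
      · simp [hz]
      · have hi0 : ¬ index = 0 := by omega
        simp only [hz, hi0, if_false]
        rw [List.filterMap_append, List.filterMap_append, List.filterMap_append]
        rw [List.filterMap_map, List.filterMap_map, List.filterMap_map]
        rw [show (pvF target expr v l) ∘
              (fun rest => ['+'] :: PySem.List.slice cs (some (index : Int)) (some (e : Int)) :: rest)
              = pvF target (expr ++ '+' :: PySem.List.slice cs (some (index : Int)) (some (e : Int)))
                  (v + (PySem.Int.ofChars? (PySem.List.slice cs (some (index : Int)) (some (e : Int)))).getD 0)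
                  ((PySem.Int.ofChars? (PySem.List.slice cs (some (index : Int)) (some (e : Int)))).getD 0)
            from funext fun rest => pvF_plus _ _ _ _ _ _]
        rw [show (pvF target expr v l) ∘
              (fun rest => ['-'] :: PySem.List.slice cs (some (index : Int)) (some (e : Int)) :: rest)
              = pvF target (expr ++ '-' :: PySem.List.slice cs (some (index : Int)) (some (e : Int)))
                  (v - (PySem.Int.ofChars? (PySem.List.slice cs (some (index : Int)) (some (e : Int)))).getD 0)
                  (-(PySem.Int.ofChars? (PySem.List.slice cs (some (index : Int)) (some (e : Int)))).getD 0)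
            from funext fun rest => pvF_minus _ _ _ _ _ _]
        rw [show (pvF target expr v l) ∘
              (fun rest => ['*'] :: PySem.List.slice cs (some (index : Int)) (some (e : Int)) :: rest)
              = pvF target (expr ++ '*' :: PySem.List.slice cs (some (index : Int)) (some (e : Int)))
                  (v - l + l * (PySem.Int.ofChars? (PySem.List.slice cs (some (index : Int)) (some (e : Int)))).getD 0)
                  (l * (PySem.Int.ofChars? (PySem.List.slice cs (some (index : Int)) (some (e : Int)))).getD 0)
            from funext fun rest => pvF_times _ _ _ _ _ _]
        rw [H e _ _ _ (by omega) (by omega), H e _ _ _ (by omega) (by omega),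
            H e _ _ _ (by omega) (by omega)]
        rw [ihn (e + 1) index expr v l (by omega) (by omega) hi (by omega)]
    · simp [hel]

lemma pv_back_eq (cs : List Char) (target : Int) :
    ∀ fuel index expr v l, 0 < index → cs.length < index + fuel →
      pvBackA cs target fuel index expr v l
        = (pvTailsB cs fuel index).filterMap (pvF target expr v l) := by
  intro fuel
  induction fuel with
  | zero =>
    intro index expr v l hi hf
    rw [pvBackA, pvTailsB]
    simp
  | succ f ih =>
    intro index expr v l hi hf
    rw [pvBackA, pvTailsB]
    simp only [Nat.succ_ne_zero, if_false, Nat.add_sub_cancel]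
    by_cases h : index = cs.length
    · simp only [h, if_true, List.filterMap_cons, List.filterMap_nil]
      have hF : pvF target expr v l [] = if v = target then some (String.ofList expr) else none := by
        unfold pvF
        simp [pvEvalCont]
      rw [hF]
      split_ifs <;> rfl
    · simp only [h, if_false]
      exact pv_loop_eq cs target f ih (cs.length + 1) (index + 1) index expr v l
        (by omega) (by omega) hi (by omega)

lemma pvG_eq (target : Int) (chunk : List Char) (rest : List (List Char)) :
    (if pvEvalB (chunk :: rest) = target
      then some (String.ofList (PySem.Chars.join [] (chunk :: rest))) else none)
      = pvF target chunk ((PySem.Int.ofChars? chunk).getD 0)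
          ((PySem.Int.ofChars? chunk).getD 0) rest := by
  unfold pvF
  rw [show pvEvalB (chunk :: rest)
        = pvEvalLoopB 0 1 ((PySem.Int.ofChars? chunk).getD 0) rest from rfl]
  rw [pv_evalLoopB_eq, pv_join_nil_cons]
  simp

lemma pv_head_eq (cs : List Char) (target : Int) (fuel : Nat) :
    ∀ n e expr v l, cs.length + 1 - e ≤ n → 0 < e → cs.length < e + fuel →
      pvLoopA cs target fuel 0 e expr v l = pvHeadB cs target fuel e := by
  intro n
  induction n with
  | zero =>
    intro e expr v l hle he hf
    rw [pvLoopA, pvHeadB]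
    have hgt : ¬ e ≤ cs.length := by omega
    simp [hgt]
  | succ n ihn =>
    intro e expr v l hle he hf
    rw [pvLoopA, pvHeadB]
    by_cases hel : e ≤ cs.length
    · simp only [hel, if_true, Nat.cast_zero, PySem.List.slice_zero_start]
      by_cases hz : 1 < (PySem.List.slice cs none (some (e : Int))).length ∧
          (PySem.List.slice cs none (some (e : Int)))[0]? = some '0'
      · rw [if_pos hz, if_pos hz]
      · rw [if_neg hz, if_neg hz]
        rw [pv_back_eq cs target fuel e _ _ _ (by omega) (by omega)]
        rw [ihn (e + 1) expr v l (by omega) (by omega) (by omega)]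
        congr 1
        refine congrArg (List.filterMap · (pvTailsB cs fuel e)) ?_
        funext rest
        exact (pvG_eq target _ rest).symm
    · simp [hel]

-- ===== VERDICT (by name: the statement is the Claim_ definition above) =====
theorem magic_expression_spec : Claim_equal_magic_expression := by
  intro digits target _hdom hpre
  unfold Spec_magic_expression
  unfold magic_expression magic_expression_alt
  have hd : PySem.Str.strIsdigit digits = true := hpre
  simp only [hd, if_true]
  have hne : digits.toList ≠ [] := by
    rw [PySem.Str.strIsdigit_eq] at hd
    cases h : digits.toList with
    | nil => rw [h] at hd; simp [PySem.Chars.strIsdigit] at hd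
    | cons a t => simp
  have hlen : 0 < digits.toList.length := List.length_pos_of_ne_nil hne
  congr 1
  rw [pvBackA]
  rw [if_neg (by omega : ¬ (digits.toList.length + 1 = 0))]
  rw [if_neg (by omega : ¬ (0 = digits.toList.length))]
  simp only [Nat.add_sub_cancel]
  exact pv_head_eq digits.toList target digits.toList.length (digits.toList.length + 1) 1 [] 0 0
    (by omega) (by omega) (by omega)
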